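-- pv_equiv track=rewrite | github.com/zhishicherezi/python-itacademy | clocks.py | g_time
-- ===== SOURCE A (Python) =====
-- def g_time(time, nums, spc, col_v):
--     ltime = []
--     for k in range(7):
--         ltime.append(col_v)
--         for i in time:
--             if i.isdigit():
--                 ltime[k] += nums[i][k]
--             else:
--                 ltime[k] += spc[k]
--         ltime[k] += '\033[0m'
--     return ltime
-- ===== SOURCE B (Python) =====
-- def g_time(time, nums, spc, col_v):
--     # Single pass over the characters of `time`, carrying all 7 partial rows
--     # at once (column-major fold), instead of 7 row-major passes.
--     rows = [col_v] * 7
--     for ch in time: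
--         g = nums[ch] if ch.isdigit() else spc
--         rows = [r + g[k] for k, r in enumerate(rows)]
--     return [r + '\033[0m' for r in rows]
-- ===== Notes on version B (the rewrite author's own statement) =====
-- stated objective: alternative
-- what changed: B replaces A's 7 row-major passes over time (outer loop over rows, inner over characters) by a single column-major pass over time that carries all 7 partial rows as one accumulator, doing one isdigit test and one dict lookup per character instead of one per character per row.
import Mathlib
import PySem

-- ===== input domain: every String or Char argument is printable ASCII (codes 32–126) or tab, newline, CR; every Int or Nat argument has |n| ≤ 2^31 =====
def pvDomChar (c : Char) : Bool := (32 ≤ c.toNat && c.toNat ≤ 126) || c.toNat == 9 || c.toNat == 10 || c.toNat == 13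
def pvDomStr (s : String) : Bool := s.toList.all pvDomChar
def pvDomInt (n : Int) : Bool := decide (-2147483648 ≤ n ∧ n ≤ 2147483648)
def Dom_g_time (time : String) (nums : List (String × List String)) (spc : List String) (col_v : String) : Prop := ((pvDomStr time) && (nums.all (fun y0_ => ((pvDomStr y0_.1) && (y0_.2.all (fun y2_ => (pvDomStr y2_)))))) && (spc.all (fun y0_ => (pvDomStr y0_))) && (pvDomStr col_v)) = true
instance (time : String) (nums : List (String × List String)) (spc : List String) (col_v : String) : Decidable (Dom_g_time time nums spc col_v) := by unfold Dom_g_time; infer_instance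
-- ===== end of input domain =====

-- B makes a single column-major pass over `time` carrying all 7 partial rows as one
-- accumulator, instead of A's 7 row-major passes; a different decomposition of the same task.

-- ===== PORT A =====
-- literal port of A: for k in range(7): row := col_v; for i in time: row += nums[i][k] / spc[k]; row += reset
def g_time (time : String) (nums : List (String × List String)) (spc : List String) (col_v : String) : List String :=
  (PySem.List.pyRange 0 7 1).foldl
    (fun ltime k =>
      let row := time.toList.foldl
        (fun s i =>
          if PySem.Chars.isdigit i then
            s ++ PySem.List.pyGetD (((PySem.Dict.mk nums).get? (String.ofList [i])).getD []) k ""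
          else
            s ++ PySem.List.pyGetD spc k "")
        col_v
      ltime ++ [row ++ "\x1b[0m"])
    []

-- ===== PORT B =====
-- literal port of Source B: rows := [col_v]*7; for ch in time: rows := [r + g[k] for k,r in enumerate(rows)]
def g_time_alt (time : String) (nums : List (String × List String)) (spc : List String) (col_v : String) : List String :=
  let rows := time.toList.foldl
    (fun rows ch =>
      let g := if PySem.Chars.isdigit ch then ((PySem.Dict.mk nums).get? (String.ofList [ch])).getD [] else spc
      (PySem.List.enumerate rows 0).map (fun kr => kr.2 ++ PySem.List.pyGetD g kr.1 ""))
    (List.replicate 7 col_v)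
  rows.map (fun r => r ++ "\x1b[0m")

-- ===== PRECONDITION & SPEC =====
-- Pre_ excludes exactly the inputs where Python A raises: a digit of `time` missing from `nums`
-- or with a glyph list shorter than 7 (KeyError / IndexError), or a non-digit in `time` with
-- `spc` shorter than 7 (IndexError).
def Pre_g_time (time : String) (nums : List (String × List String)) (spc : List String) (col_v : String) : Prop :=
  (time.toList.all (fun c =>
    if PySem.Chars.isdigit c then
      ((PySem.Dict.mk nums).get? (String.ofList [c])).isSome &&
      decide (7 ≤ (((PySem.Dict.mk nums).get? (String.ofList [c])).getD []).length)
    else decide (7 ≤ spc.length))) = true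
instance (time : String) (nums : List (String × List String)) (spc : List String) (col_v : String) : Decidable (Pre_g_time time nums spc col_v) := by unfold Pre_g_time; infer_instance

def pvWitness_g_time : String × (List (String × List String)) × List String × String :=
  ("1a", [("1", ["a","b","c","d","e","f","g"])], ["p","q","r","s","t","u","v"], "V")

def Spec_g_time (time : String) (nums : List (String × List String)) (spc : List String) (col_v : String) (out : List String) : Prop := out = g_time_alt time nums spc col_v
instance (time : String) (nums : List (String × List String)) (spc : List String) (col_v : String) (out : List String) : Decidable (Spec_g_time time nums spc col_v out) := by unfold Spec_g_time; infer_instance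

-- ===== CLAIM =====
def Claim_equal_g_time : Prop := ∀ (time : String) (nums : List (String × List String)) (spc : List String) (col_v : String), Dom_g_time time nums spc col_v → Pre_g_time time nums spc col_v → Spec_g_time time nums spc col_v (g_time time nums spc col_v)

-- ===== LEMMAS AND PROOFS =====

theorem pv_intercalate_nil (xss : List (List Char)) : ([] : List Char).intercalate xss = xss.flatten := by
  induction xss with
  | nil => rfl
  | cons x t ih => cases t <;> simp_all [List.intercalate, List.intersperse]

theorem pv_join_nil : PySem.Str.join "" ([] : List String) = "" := by
  simp [PySem.Str.join, PySem.Chars.join, pv_intercalate_nil]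

theorem pv_join_cons (x : String) (xs : List String) :
    PySem.Str.join "" (x :: xs) = x ++ PySem.Str.join "" xs := by
  simp [PySem.Str.join, PySem.Chars.join, pv_intercalate_nil, String.ofList_append]

theorem pv_row_eq (l : List Char) (f : Char → String) (init : String) :
    l.foldl (fun s i => s ++ f i) init = init ++ PySem.Str.join "" (l.map f) := by
  induction l generalizing init with
  | nil => simp [pv_join_nil]
  | cons c t ih =>
    simp only [List.foldl_cons, List.map_cons, ih, pv_join_cons, String.append_assoc]

-- enumerating a list built by mapping over an enumeration keeps the same indices
theorem pv_enum_map (gl : List String) (rows : List String) (s : Int) :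
    PySem.List.enumerate ((PySem.List.enumerate rows s).map (fun kr => kr.2 ++ PySem.List.pyGetD gl kr.1 "")) s
      = (PySem.List.enumerate rows s).map (fun kr => (kr.1, kr.2 ++ PySem.List.pyGetD gl kr.1 "")) := by
  induction rows generalizing s with
  | nil => simp [PySem.List.enumerate_nil]
  | cons x t ih => simp [PySem.List.enumerate_cons, ih]

-- the invariant of B's single pass: each carried row grows by its glyph-row tail
theorem pv_build (f : Char → List String) (l : List Char) (rows : List String) :
    l.foldl
      (fun rows ch =>
        (PySem.List.enumerate rows 0).map (fun kr => kr.2 ++ PySem.List.pyGetD (f ch) kr.1 ""))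
      rows
    = (PySem.List.enumerate rows 0).map
        (fun kr => kr.2 ++ PySem.Str.join "" (l.map (fun c => PySem.List.pyGetD (f c) kr.1 ""))) := by
  induction l generalizing rows with
  | nil =>
    simp only [List.foldl_nil, List.map_nil, pv_join_nil]
    have : ((PySem.List.enumerate rows 0).map (fun kr => kr.2 ++ "")) = (PySem.List.enumerate rows 0).map (·.2) := by
      apply List.map_congr_left; intro kr _; simp
    rw [this, PySem.List.map_snd_enumerate]
  | cons c t ih =>
    rw [List.foldl_cons, ih, pv_enum_map (f c) rows 0, List.map_map]
    apply List.map_congr_left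
    intro kr _
    simp [pv_join_cons, String.append_assoc]

-- ===== VERDICT =====
theorem g_time_spec : Claim_equal_g_time := by
  intro time nums spc col_v _ _
  unfold Spec_g_time g_time g_time_alt
  rw [PySem.List.foldl_append_singleton_eq_map]
  simp only [List.nil_append]
  -- normalize A's rows
  have hbody : ∀ k : Int, (fun (s : String) (i : Char) =>
      if PySem.Chars.isdigit i then
        s ++ PySem.List.pyGetD (((PySem.Dict.mk nums).get? (String.ofList [i])).getD []) k ""
      else s ++ PySem.List.pyGetD spc k "") =
      (fun (s : String) (i : Char) => s ++ PySem.List.pyGetD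
        (if PySem.Chars.isdigit i then ((PySem.Dict.mk nums).get? (String.ofList [i])).getD [] else spc) k "") := by
    intro k; funext s i
    by_cases h : PySem.Chars.isdigit i <;> simp [h]
  -- normalize B's rows via the single-pass invariant
  rw [pv_build (fun ch => if PySem.Chars.isdigit ch then ((PySem.Dict.mk nums).get? (String.ofList [ch])).getD [] else spc) time.toList (List.replicate 7 col_v)]
  rw [PySem.List.enumerate_eq_map_pyRange (List.replicate 7 col_v) ""]
  simp only [List.map_map]
  apply List.map_congr_left
  intro k hk
  rw [hbody k, pv_row_eq]
  have hk7 : (0:Int) ≤ k ∧ k < 7 := by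
    have := PySem.List.mem_pyRange_one.mp hk; omega
  simp [Function.comp_def, String.append_assoc]
  obtain ⟨h0, h7⟩ := hk7
  interval_cases k <;> rfl
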